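-- pv_equiv track=rewrite | github.com/Aka-Ikenga/Daily-Coding-Problems | shift_string.py | shift_string
-- ===== SOURCE A (Python) =====
-- def shift_string(a, b):
--     for i in range(1, len(a)):
--         s = a[:i]
--         c = a.replace(s, '')
--         for j in range(1, len(c)+1):
--             t = list(c)
--             t.insert(j, s)
--             if ''.join(t) == b: return True
--
--     else: return False
-- ===== SOURCE B (Python) =====
-- # B: per prefix length i, locate valid insertion points via longest common
-- # prefix/suffix of b and c plus one substring search, instead of building and
-- # comparing every candidate string.
--
-- def _lcp(x, y):
--     k = 0
--     while k < len(x) and k < len(y) and x[k] == y[k]: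
--         k += 1
--     return k
--
--
-- def shift_string(a, b):
--     for i in range(1, len(a)):
--         s = a[:i]
--         c = a.replace(s, '')
--         m = len(c)
--         if len(b) != m + i:
--             continue
--         p = _lcp(b, c)                      # j <= p  <=>  b[:j] == c[:j]
--         q = _lcp(b[::-1], c[::-1])          # m-j <= q  <=>  b[j+i:] == c[j:]
--         lo = max(1, m - q)
--         k = b[lo:].find(s)                  # first j >= lo with b[j:j+i] == s
--         if k != -1 and lo + k <= p:
--             return True
--     return False
-- ===== Notes on version B (the rewrite author's own statement) =====
-- stated objective: faster
-- what changed: Instead of building and comparing every candidate string c[:j]+s+c[j:], B computes per prefix the longest common prefix/suffix of b and c and does a single substring search for s, so each prefix length costs one linear pass instead of a quadratic inner loop.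
import Mathlib
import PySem

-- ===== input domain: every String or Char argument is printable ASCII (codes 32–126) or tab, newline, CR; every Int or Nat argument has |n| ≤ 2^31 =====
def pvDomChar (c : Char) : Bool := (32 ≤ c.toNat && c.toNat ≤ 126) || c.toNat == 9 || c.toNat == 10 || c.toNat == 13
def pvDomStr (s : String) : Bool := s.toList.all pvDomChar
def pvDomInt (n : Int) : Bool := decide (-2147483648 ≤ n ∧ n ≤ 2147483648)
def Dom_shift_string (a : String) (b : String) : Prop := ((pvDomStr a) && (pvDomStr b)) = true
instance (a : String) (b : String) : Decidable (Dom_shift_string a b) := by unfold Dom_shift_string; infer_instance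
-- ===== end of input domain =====

-- B replaces A's inner loop (build and compare every candidate string) by an LCP/LCS
-- computation plus one substring search per prefix length; equal return values proved below.

-- ===== PORT A =====
-- for i in range(1, len(a)): s = a[:i]; c = a.replace(s, '');
--   for j in range(1, len(c)+1): t = list(c); t.insert(j, s); if ''.join(t) == b: return True
-- return False
def shift_string (a : String) (b : String) : Bool :=
  let al := a.toList
  (PySem.List.pyRange 1 (al.length : Int) 1).any fun i =>
    let s := PySem.Chars.slice al none (some i)            -- a[:i]
    let c := PySem.Chars.replace al s []                   -- a.replace(s, '')
    (PySem.List.pyRange 1 ((c.length : Int) + 1) 1).any fun j =>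
      let t := c.map (fun ch => [ch])                      -- list(c): one-char strings
      PySem.Chars.join [] (PySem.List.insert t j s) == b.toList  -- ''.join(t) == b

-- ===== PORT B =====
-- _lcp(x, y): count of equal leading characters (the while loop, structurally)
def lcpChars : List Char → List Char → Nat
  | x :: xs, y :: ys => if x = y then lcpChars xs ys + 1 else 0
  | _, _ => 0

def shift_string_alt (a : String) (b : String) : Bool :=
  let al := a.toList
  let bl := b.toList
  (PySem.List.pyRange 1 (al.length : Int) 1).any fun i =>
    let s := PySem.Chars.slice al none (some i)            -- a[:i]
    let c := PySem.Chars.replace al s []                   -- a.replace(s, '')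
    let m := c.length
    if (bl.length : Int) ≠ (m : Int) + i then false        -- if len(b) != m + i: continue
    else
      let p := lcpChars bl c                               -- p = _lcp(b, c)
      let q := lcpChars bl.reverse c.reverse               -- q = _lcp(b[::-1], c[::-1])  (b[::-1] is reverse: PySem.Chars lemma slice?_none_none_neg_one)
      let lo : Int := max 1 ((m : Int) - (q : Int))        -- lo = max(1, m - q)
      let k := PySem.Chars.find (PySem.List.slice bl (some lo) none) s   -- k = b[lo:].find(s)
      decide (k ≠ -1 ∧ lo + k ≤ (p : Int))                 -- k != -1 and lo + k <= p

-- ===== PRECONDITION & SPEC =====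
def Spec_shift_string (a : String) (b : String) (out : Bool) : Prop := out = shift_string_alt a b
instance (a : String) (b : String) (out : Bool) : Decidable (Spec_shift_string a b out) := by unfold Spec_shift_string; infer_instance

-- ===== CLAIM (what is proved, stated in full; the proofs are below) =====
def Claim_equal_shift_string : Prop := ∀ (a : String) (b : String), Dom_shift_string a b → Spec_shift_string a b (shift_string a b)

-- ===== LEMMAS AND PROOFS =====

theorem join_nil_eq_flatten (l : List (List Char)) : PySem.Chars.join [] l = l.flatten := by
  show List.intercalate [] l = l.flatten
  induction l with
  | nil => rfl
  | cons x t ih =>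
    cases t with
    | nil => simp [List.intercalate]
    | cons y u =>
      simp only [List.intercalate, List.intersperse] at ih ⊢
      simp_all

theorem flatten_singletons (l : List Char) : (l.map (fun ch => [ch])).flatten = l := by
  induction l <;> simp_all

theorem lcpChars_le (x y : List Char) : lcpChars x y ≤ x.length ∧ lcpChars x y ≤ y.length := by
  induction x generalizing y with
  | nil => cases y <;> simp [lcpChars]
  | cons a xs ih =>
    cases y with
    | nil => simp [lcpChars]
    | cons b ys =>
      by_cases h : a = b <;> simp [lcpChars, h]
      exact ⟨(ih ys).1, (ih ys).2⟩

theorem take_eq_iff_le_lcp (x y : List Char) (k : Nat) (hx : k ≤ x.length) (hy : k ≤ y.length) :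
    x.take k = y.take k ↔ k ≤ lcpChars x y := by
  induction x generalizing y k with
  | nil =>
    simp only [List.length_nil, Nat.le_zero] at hx
    subst hx; simp
  | cons a xs ih =>
    cases y with
    | nil =>
      simp only [List.length_nil, Nat.le_zero] at hy
      subst hy; simp
    | cons b ys =>
      cases k with
      | zero => simp
      | succ k =>
        simp only [List.take_succ_cons, List.cons.injEq]
        by_cases h : a = b
        · have := ih ys k (by simpa using hx) (by simpa using hy)
          simp [lcpChars, h, this]
        · simp [lcpChars, h]

theorem suffix_eq_iff_le_revlcp (x y : List Char) (r : Nat) (hx : r ≤ x.length) (hy : r ≤ y.length) :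
    x.drop (x.length - r) = y.drop (y.length - r) ↔ r ≤ lcpChars x.reverse y.reverse := by
  rw [← take_eq_iff_le_lcp x.reverse y.reverse r (by simpa) (by simpa)]
  rw [List.take_reverse, List.take_reverse]
  constructor
  · intro h; rw [h]
  · intro h; exact List.reverse_injective h

-- the core characterisation of one candidate c[:j] + s + c[j:]
theorem cand_iff (s c bl : List Char) (jn : Nat) (hj : jn ≤ c.length) :
    c.take jn ++ s ++ c.drop jn = bl ↔
      (bl.length = c.length + s.length ∧ jn ≤ lcpChars bl c ∧
       c.length - jn ≤ lcpChars bl.reverse c.reverse ∧ s <+: bl.drop jn) := by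
  constructor
  · rintro rfl
    set bl := c.take jn ++ s ++ c.drop jn with hbl
    have hlen : bl.length = c.length + s.length := by
      simp only [hbl, List.length_append, List.length_take, List.length_drop]
      omega
    have htk : bl.take jn = c.take jn := by
      rw [hbl, List.append_assoc, List.take_append_of_le_length (by simp; omega)]
      simp [List.take_take]
    have hdrop : bl.drop jn = s ++ c.drop jn := by
      rw [hbl, List.append_assoc, List.drop_append_of_le_length (by simp; omega)]
      rw [List.drop_eq_nil_of_le (by simp), List.nil_append]
    refine ⟨hlen, ?_, ?_, ?_⟩
    · rw [← take_eq_iff_le_lcp bl c jn (by omega) hj]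
      exact htk
    · rw [← suffix_eq_iff_le_revlcp bl c (c.length - jn) (by omega) (by omega)]
      have h1 : bl.length - (c.length - jn) = jn + s.length := by omega
      have h2 : c.length - (c.length - jn) = jn := by omega
      rw [h1, h2, ← List.drop_drop, hdrop]
      simp
    · rw [hdrop]; exact List.prefix_append s _
  · rintro ⟨hlen, hp, hq, hpre⟩
    have hjb : jn ≤ bl.length := by omega
    have htk : bl.take jn = c.take jn :=
      (take_eq_iff_le_lcp bl c jn hjb hj).2 hp
    have hmid : bl.drop jn = s ++ bl.drop (jn + s.length) := by
      obtain ⟨t, ht⟩ := hpre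
      rw [← ht]
      congr 1
      have h3 : t = (s ++ t).drop s.length := by simp
      rw [h3, ht, List.drop_drop, Nat.add_comm]
    have hsuf : bl.drop (jn + s.length) = c.drop jn := by
      have := (suffix_eq_iff_le_revlcp bl c (c.length - jn) (by omega) (by omega)).2 hq
      have h1 : bl.length - (c.length - jn) = jn + s.length := by omega
      have h2 : c.length - (c.length - jn) = jn := by omega
      rwa [h1, h2] at this
    calc c.take jn ++ s ++ c.drop jn
        = bl.take jn ++ (s ++ bl.drop (jn + s.length)) := by
          rw [htk, hsuf, List.append_assoc]
      _ = bl.take jn ++ bl.drop jn := by rw [← hmid]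
      _ = bl := List.take_append_drop jn bl

-- A's inner loop as an existential
theorem A_inner_iff (s c bl : List Char) :
    ((PySem.List.pyRange 1 ((c.length : Int) + 1) 1).any fun j =>
        PySem.Chars.join [] (PySem.List.insert (c.map (fun ch => [ch])) j s) == bl) = true ↔
      ∃ jn : Nat, 1 ≤ jn ∧ jn ≤ c.length ∧ c.take jn ++ s ++ c.drop jn = bl := by
  rw [List.any_eq_true]
  constructor
  · rintro ⟨j, hj, hpred⟩
    rw [PySem.List.mem_pyRange_one] at hj
    refine ⟨j.toNat, by omega, by omega, ?_⟩
    have hcast : (j.toNat : Int) = j := by omega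
    rw [← hcast, PySem.List.insert_natCast _ _ _ (by simp; omega),
        join_nil_eq_flatten] at hpred
    simpa [← List.map_take, ← List.map_drop, List.flatten_append, flatten_singletons] using hpred
  · rintro ⟨jn, h1, h2, heq⟩
    refine ⟨(jn : Int), PySem.List.mem_pyRange_one.2 (by omega), ?_⟩
    rw [PySem.List.insert_natCast _ _ _ (by simpa), join_nil_eq_flatten]
    simpa [← List.map_take, ← List.map_drop, List.flatten_append, flatten_singletons] using heq

-- B's inner body as the same existential
theorem B_inner_iff (s c bl : List Char) :
    (if (bl.length : Int) ≠ (c.length : Int) + (s.length : Int) then false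
     else
       let p := lcpChars bl c
       let q := lcpChars bl.reverse c.reverse
       let lo : Int := max 1 ((c.length : Int) - (q : Int))
       let k := PySem.Chars.find (PySem.List.slice bl (some lo) none) s
       decide (k ≠ -1 ∧ lo + k ≤ (p : Int))) = true ↔
      ∃ jn : Nat, 1 ≤ jn ∧ jn ≤ c.length ∧ c.take jn ++ s ++ c.drop jn = bl := by
  by_cases hg : (bl.length : Int) ≠ (c.length : Int) + (s.length : Int)
  · rw [if_pos hg]
    simp only [Bool.false_eq_true, false_iff]
    rintro ⟨jn, h1, h2, heq⟩
    have := congrArg List.length heq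
    simp only [List.length_append, List.length_take, List.length_drop] at this
    apply hg
    omega
  · rw [if_neg hg]
    push Not at hg
    have hblen : bl.length = c.length + s.length := by exact_mod_cast hg
    set p := lcpChars bl c with hp_def
    set q := lcpChars bl.reverse c.reverse with hq_def
    have hpm : p ≤ c.length := (lcpChars_le bl c).2
    set loN : Nat := max 1 (c.length - q) with hloN
    have hlo : (max 1 ((c.length : Int) - (q : Int))) = (loN : Int) := by omega
    have hslice : PySem.List.slice bl (some (loN : Int)) none = bl.drop loN := by
      rw [PySem.List.slice_from bl (by omega)]
      simp
    simp only [decide_eq_true_iff, hlo, hslice]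
    set k := PySem.Chars.find (bl.drop loN) s with hk_def
    constructor
    · rintro ⟨hk, hkp⟩
      have hk0 : 0 ≤ k := by
        have := PySem.Chars.neg_one_le_find (bl.drop loN) s
        omega
      obtain ⟨hpre, -⟩ := PySem.Chars.find_spec (s := bl.drop loN) (sub := s) hk0
      have hjp : loN + k.toNat ≤ p := by omega
      refine ⟨loN + k.toNat, by omega, by omega, ?_⟩
      refine (cand_iff s c bl (loN + k.toNat) (by omega)).2 ⟨hblen, hjp, by omega, ?_⟩
      rwa [List.drop_drop] at hpre
    · rintro ⟨jn, h1, h2, heq⟩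
      obtain ⟨-, hjp, hjq, hpre⟩ := (cand_iff s c bl jn h2).1 heq
      have hjlo : loN ≤ jn := by omega
      have hpre' : s <+: (bl.drop loN).drop (jn - loN) := by
        rw [List.drop_drop]
        have h3 : loN + (jn - loN) = jn := by omega
        rwa [h3]
      have hk : k ≠ -1 := by
        rw [hk_def, PySem.Chars.find_ne_neg_one_iff]
        rw [← PySem.Chars.isIn_iff_infix]
        exact (PySem.Chars.exists_prefix_drop_iff_isIn s (bl.drop loN)).1 ⟨jn - loN, hpre'⟩
      have hk0 : 0 ≤ k := by
        have := PySem.Chars.neg_one_le_find (bl.drop loN) s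
        omega
      obtain ⟨-, hmin⟩ := PySem.Chars.find_spec (s := bl.drop loN) (sub := s) hk0
      have hkle : k.toNat ≤ jn - loN := by
        by_contra h
        exact hmin (jn - loN) (by omega) hpre'
      exact ⟨hk, by omega⟩

-- the two inner bodies agree, for every s, c, bl
theorem inner_eq (s c bl : List Char) :
    ((PySem.List.pyRange 1 ((c.length : Int) + 1) 1).any fun j =>
        PySem.Chars.join [] (PySem.List.insert (c.map (fun ch => [ch])) j s) == bl)
    = (if (bl.length : Int) ≠ (c.length : Int) + (s.length : Int) then false
       else
         let p := lcpChars bl c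
         let q := lcpChars bl.reverse c.reverse
         let lo : Int := max 1 ((c.length : Int) - (q : Int))
         let k := PySem.Chars.find (PySem.List.slice bl (some lo) none) s
         decide (k ≠ -1 ∧ lo + k ≤ (p : Int))) := by
  rcases h1 : ((PySem.List.pyRange 1 ((c.length : Int) + 1) 1).any fun j =>
      PySem.Chars.join [] (PySem.List.insert (c.map (fun ch => [ch])) j s) == bl) with _ | _
  · rcases h2 : (if (bl.length : Int) ≠ (c.length : Int) + (s.length : Int) then false
       else
         let p := lcpChars bl c
         let q := lcpChars bl.reverse c.reverse
         let lo : Int := max 1 ((c.length : Int) - (q : Int))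
         let k := PySem.Chars.find (PySem.List.slice bl (some lo) none) s
         decide (k ≠ -1 ∧ lo + k ≤ (p : Int))) with _ | _
    · rfl
    · exact absurd ((A_inner_iff s c bl).2 ((B_inner_iff s c bl).1 h2)) (by simp [h1])
  · exact ((B_inner_iff s c bl).2 ((A_inner_iff s c bl).1 h1)).symm

-- ===== VERDICT (by name: the statement is the Claim_ definition above) =====
theorem shift_string_spec : Claim_equal_shift_string := by
  intro a b _
  unfold Spec_shift_string shift_string shift_string_alt
  refine PySem.List.any_congr_mem ?_
  intro i hi
  rw [PySem.List.mem_pyRange_one] at hi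
  have hcast : ((i.toNat : Nat) : Int) = i := by omega
  have hslen : (PySem.Chars.slice a.toList none (some i)).length = i.toNat := by
    rw [PySem.Chars.slice_eq_listSlice, PySem.List.slice_to a.toList (by omega)]
    rw [List.length_take]; omega
  rw [inner_eq]
  rw [hslen, hcast]
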